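-- pv_equiv track=rewrite | github.com/MatthijsPon/course-scripts | hidden_markov_models.py | calc_match_states
-- ===== SOURCE A (Python) =====
-- def is_match_state(seq_dict, location):
--     """Determines if the current location is a match state.
--
--     :param seq_dict: dictionary of strings, sequences.
--     :param location: (int) current position in sequences.
--     :return: boolean.
--     """
--     count = 0
--
--     for keys in seq_dict:
--         if seq_dict[keys][location] != "-":
--             count += 1
--
--     if count > len(seq_dict) / 2:
--         return True
--     else:
--         return False
--
-- def calc_match_states(seq_dict, len_align):
--     """Creates a list of match states in the aligned sequences.
--
--     :param seq_dict: dictionary of strings, sequences.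
--     :param len_align: int, length of the alignment.
--     :return: match_states: list of booleans
--              n_matches: int, amount of match states.
--     """
--     match_states = [False for i in range(len_align)]
--     n_matches = 0
--
--     for i in range(len_align):
--         if is_match_state(seq_dict, i):
--             match_states[i] = True
--             n_matches += 1
--
--     return match_states, n_matches
-- ===== SOURCE B (Python) =====
-- def calc_match_states(seq_dict, len_align):
--     """Row-major re-implementation: one pass over the sequences maintaining a
--     per-column non-gap count table, then one pass turning counts into states."""
--     n = max(len_align, 0)
--     counts = [0] * n
--     for seq in seq_dict.values():
--         counts = [c + (ch != "-") for c, ch in zip(counts, seq)]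
--     half = len(seq_dict) / 2
--     match_states = [c > half for c in counts]
--     return match_states, sum(match_states)
-- ===== Notes on version B (the rewrite author's own statement) =====
-- stated objective: alternative
-- what changed: Replaces A's column-major nested scan (a fresh pass over the whole dict for every alignment position, with a per-column dict-key lookup) by a single row-major pass that maintains a per-column non-gap count table via zip, followed by one pass turning counts into match states; same O(n_seq*len_align) cost. Pre_ excludes ragged inputs (some sequence shorter than len_align), on which A raises IndexError, and association lists with duplicate keys, which no Python dict can represent.
import Mathlib
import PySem

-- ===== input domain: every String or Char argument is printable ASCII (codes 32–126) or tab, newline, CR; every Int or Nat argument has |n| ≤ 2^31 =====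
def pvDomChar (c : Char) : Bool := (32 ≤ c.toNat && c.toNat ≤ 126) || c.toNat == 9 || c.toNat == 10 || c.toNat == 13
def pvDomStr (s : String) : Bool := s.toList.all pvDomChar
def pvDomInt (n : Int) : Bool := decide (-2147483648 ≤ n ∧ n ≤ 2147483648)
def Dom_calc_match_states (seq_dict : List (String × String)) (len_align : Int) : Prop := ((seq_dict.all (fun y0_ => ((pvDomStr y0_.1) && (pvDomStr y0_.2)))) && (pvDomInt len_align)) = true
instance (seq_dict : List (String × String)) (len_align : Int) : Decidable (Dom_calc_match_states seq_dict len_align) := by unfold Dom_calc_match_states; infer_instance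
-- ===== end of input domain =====

-- B replaces A's column-by-column rescans (one pass over the whole dict per alignment
-- position) with a single row-major pass maintaining a per-column non-gap count table,
-- then one pass turning counts into match states (objective: alternative decomposition).


-- ===== PORT A =====
-- 'for keys in seq_dict: seq_dict[keys][location]' — iterate the keys, look the value up
-- by key (first match; '.getD ""' is unreachable since every key comes from the dict itself).
-- 'count > len(seq_dict)/2' on ints is exactly '2*count > len' (float division is exact here).
def is_match_state (seq_dict : List (String × String)) (location : Int) : Bool :=
  let count : Int := seq_dict.foldl (fun count kv =>
    match PySem.Str.pyGet? (((PySem.Dict.mk seq_dict).get? kv.1).getD "") location with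
    | some ch => if ch ≠ '-' then count + 1 else count
    | none => count          -- none = IndexError; excluded by Pre_
    ) 0
  decide (2 * count > (seq_dict.length : Int))

-- 'match_states[i] = True': i comes from range(len_align) so i ≥ 0 and '.set i.toNat' is exact.
def calc_match_states (seq_dict : List (String × String)) (len_align : Int) : List Bool × Int :=
  let match_states : List Bool := (PySem.List.pyRange 0 len_align 1).map (fun _ => false)
  (PySem.List.pyRange 0 len_align 1).foldl
    (fun st i => if is_match_state seq_dict i then (st.1.set i.toNat true, st.2 + 1) else st)
    (match_states, (0 : Int))

-- ===== PORT B =====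
-- counts = [0]*n; for seq in values: counts = [c + (ch != '-') for c, ch in zip(counts, seq)];
-- then match_states = [c > len/2 for c in counts] and n_matches = sum(match_states).
def calc_match_states_alt (seq_dict : List (String × String)) (len_align : Int) : List Bool × Int :=
  let n : Nat := (max len_align 0).toNat                      -- n = max(len_align, 0)
  let counts : List Int := List.replicate n 0                 -- [0] * n
  let counts := seq_dict.foldl
    (fun counts kv => (counts.zip kv.2.toList).map (fun p => p.1 + (if p.2 ≠ '-' then 1 else 0)))
    counts
  let match_states := counts.map (fun c => decide (2 * c > (seq_dict.length : Int)))  -- c > len/2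
  (match_states, (match_states.count true : Int))             -- sum(match_states)

-- ===== PRECONDITION & SPEC =====
-- Pre_ excludes (a) assoc lists with duplicate keys — not representable as a Python dict,
-- A's first-match key lookup would count the first value repeatedly — and (b) ragged inputs
-- with a sequence shorter than len_align, on which A raises IndexError.
def Pre_calc_match_states (seq_dict : List (String × String)) (len_align : Int) : Prop :=
  (seq_dict.map Prod.fst).Nodup ∧ ∀ kv ∈ seq_dict, len_align ≤ (kv.2.toList.length : Int)
instance (seq_dict : List (String × String)) (len_align : Int) : Decidable (Pre_calc_match_states seq_dict len_align) := by unfold Pre_calc_match_states; infer_instance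

def pvWitness_calc_match_states : (List (String × String)) × Int := ([("a", "ab-"), ("b", "-b-")], 3)

def Spec_calc_match_states (seq_dict : List (String × String)) (len_align : Int) (out : List Bool × Int) : Prop := out = calc_match_states_alt seq_dict len_align
instance (seq_dict : List (String × String)) (len_align : Int) (out : List Bool × Int) : Decidable (Spec_calc_match_states seq_dict len_align out) := by unfold Spec_calc_match_states; infer_instance

-- ===== CLAIM (what is proved, stated in full; the proofs are below) =====
def Claim_equal_calc_match_states : Prop := ∀ (seq_dict : List (String × String)) (len_align : Int), Dom_calc_match_states seq_dict len_align → Pre_calc_match_states seq_dict len_align → Spec_calc_match_states seq_dict len_align (calc_match_states seq_dict len_align)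

-- ===== LEMMAS AND PROOFS =====

-- number of sequences whose character in column j is not '-'
def colCnt (seq_dict : List (String × String)) (j : Nat) : Nat :=
  seq_dict.countP (fun kv => decide (kv.2.toList.getD j '-' ≠ '-'))


-- A's per-column scan computes colCnt, under unique keys and an in-range column index
theorem is_match_state_eq (seq_dict : List (String × String)) (i : Int)
    (hnd : (seq_dict.map Prod.fst).Nodup)
    (h0 : 0 ≤ i) (hlt : ∀ kv ∈ seq_dict, i < (kv.2.toList.length : Int)) :
    is_match_state seq_dict i
      = decide (2 * (colCnt seq_dict i.toNat : Int) > (seq_dict.length : Int)) := by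
  unfold is_match_state
  have hfold : seq_dict.foldl (fun count kv =>
      match PySem.Str.pyGet? (((PySem.Dict.mk seq_dict).get? kv.1).getD "") i with
      | some ch => if ch ≠ '-' then count + 1 else count
      | none => count) (0 : Int)
    = seq_dict.foldl (fun count kv =>
        if (fun kv : String × String => decide (kv.2.toList.getD i.toNat '-' ≠ '-')) kv
        then count + 1 else count) 0 := by
    apply PySem.List.foldl_congr_mem'
    intro kv hkv acc
    have hget : (PySem.Dict.mk seq_dict).get? kv.1 = some kv.2 := by
      apply PySem.Dict.get?_of_mem_items (d := PySem.Dict.mk seq_dict)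
      · exact hkv
      · exact hnd
    rw [hget]
    have hl : i.toNat < kv.2.toList.length := by
      have := hlt kv hkv; omega
    have hpy : PySem.Str.pyGet? kv.2 i = some (kv.2.toList[i.toNat]) := by
      have hi : i = ((i.toNat : Nat) : Int) := by omega
      rw [show PySem.Str.pyGet? kv.2 i = PySem.Str.pyGet? kv.2 ((i.toNat : Nat) : Int) from by rw [← hi],
          PySem.Str.pyGet?_natCast]
      simp [List.getElem?_eq_getElem hl]
    simp only [Option.getD_some, hpy]
    simp [List.getD, List.getElem?_eq_getElem hl]
  rw [hfold, PySem.List.foldl_count_if]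
  simp [colCnt]

-- A's outer loop, right-induction over range(m)
theorem calcA_loop (q : Int → Bool) (M : Nat) :
    ∀ (m : Nat) (c : Int), m ≤ M →
      (PySem.List.pyRange 0 (m : Int) 1).foldl
        (fun st i => if q i then (st.1.set i.toNat true, st.2 + 1) else st)
        (List.replicate M false, c)
      = ((List.range m).map (fun j : Nat => q (j : Int)) ++ List.replicate (M - m) false,
         c + ((List.range m).countP (fun j : Nat => q (j : Int)) : Int)) := by
  intro m
  induction m with
  | zero => intro c _; simp [PySem.List.pyRange]
  | succ m ih =>
    intro c hm
    have h1 : ((m + 1 : Nat) : Int) = (m : Int) + 1 := by push_cast; ring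
    rw [h1, PySem.List.pyRange_one_succ_right (by positivity), List.foldl_append,
        ih c (by omega)]
    simp only [List.foldl_cons, List.foldl_nil]
    have hlen : ((List.range m).map (fun j : Nat => q (j : Int))).length = m := by simp
    have hdrop : List.replicate (M - m) false = false :: List.replicate (M - (m+1)) false := by
      have : M - m = (M - (m+1)) + 1 := by omega
      rw [this, List.replicate_succ]
    have hset : (((List.range m).map (fun j : Nat => q (j : Int)) ++
          false :: List.replicate (M - (m+1)) false).set m true)
        = (List.range m).map (fun j : Nat => q (j : Int)) ++ true :: List.replicate (M - (m+1)) false := by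
      have h := List.set_append_right (s := (List.range m).map (fun j : Nat => q (j : Int)))
        (t := false :: List.replicate (M - (m+1)) false)
        ((List.range m).map (fun j : Nat => q (j : Int))).length true (le_refl _)
      rw [hlen] at h
      simp only [Nat.sub_self] at h
      exact h
    rw [List.range_succ]
    by_cases hq : q (m : Int)
    · simp only [hq, if_true, hdrop, Int.toNat_natCast, hset]
      refine Prod.ext ?_ ?_
      · simp [hq]
      · simp [List.countP_append, hq]; ring
    · simp only [hq, hdrop]
      refine Prod.ext ?_ ?_
      · simp [hq]
      · simp [List.countP_append, hq]

-- B's count-table loop, left-induction over the dict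
theorem calcB_loop (l : List (String × String)) :
    ∀ (counts : List Int), (∀ kv ∈ l, counts.length ≤ kv.2.toList.length) →
      l.foldl (fun counts kv =>
          (counts.zip kv.2.toList).map (fun p => p.1 + (if p.2 ≠ '-' then 1 else 0))) counts
      = (List.range counts.length).map (fun j => counts.getD j 0 + (colCnt l j : Int)) := by
  induction l with
  | nil =>
    intro counts _
    simp only [List.foldl_nil, colCnt, List.countP_nil]
    apply List.ext_getElem
    · simp
    · intro j hj hj2
      simp at hj2
      simp [List.getD, List.getElem?_eq_getElem hj2]
  | cons kv l ih =>
    intro counts h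
    have hlen : kv.2.toList.length ≥ counts.length := h kv (by simp)
    have hstep : ((counts.zip kv.2.toList).map (fun p => p.1 + (if p.2 ≠ '-' then 1 else 0))).length
        = counts.length := by
      rw [List.length_map, List.length_zip]; omega
    simp only [List.foldl_cons]
    rw [ih _ (by intro kv' h'; rw [hstep]; exact h kv' (List.mem_cons_of_mem _ h'))]
    rw [hstep]
    apply List.map_congr_left
    intro j hj
    simp only [List.mem_range] at hj
    have hj2 : j < kv.2.toList.length := by omega
    have hz : j < (counts.zip kv.2.toList).length := by rw [List.length_zip]; omega
    have hgd : ((counts.zip kv.2.toList).map (fun p => p.1 + (if p.2 ≠ '-' then 1 else 0))).getD j 0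
        = counts[j] + (if kv.2.toList[j] ≠ '-' then 1 else 0) := by
      rw [List.getD, List.getElem?_map, List.getElem?_eq_getElem hz]
      simp [List.getElem_zip]
    rw [hgd]
    simp only [colCnt, List.countP_cons]
    have : (kv.2.toList.getD j '-') = kv.2.toList[j] := List.getD_eq_getElem _ _ hj2
    have hcg : counts.getD j 0 = counts[j] := List.getD_eq_getElem _ _ hj
    rw [hcg, this]
    by_cases hc : kv.2.toList[j] = '-' <;> simp [hc] <;> ring

-- ===== VERDICT (by name: the statement is the Claim_ definition above) =====
theorem calc_match_states_spec : Claim_equal_calc_match_states := by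
  intro seq_dict len_align _hdom hpre
  obtain ⟨hnd, hlen⟩ := hpre
  unfold Spec_calc_match_states calc_match_states calc_match_states_alt
  set n : Nat := len_align.toNat with hn
  have hmaxn : (max len_align 0).toNat = n := by omega
  have hrange : PySem.List.pyRange 0 len_align 1 = PySem.List.pyRange 0 (n : Int) 1 := by
    by_cases h : 0 ≤ len_align
    · rw [hn, Int.toNat_of_nonneg h]
    · rw [PySem.List.pyRange_one_eq_nil (by omega), PySem.List.pyRange_one_eq_nil (by omega)]
  have hinit : (PySem.List.pyRange 0 (n : Int) 1).map (fun _ => false)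
      = List.replicate n false := by
    rw [List.map_const', PySem.List.length_pyRange_one]
    congr 1
  have hq : ∀ j ∈ List.range n,
      is_match_state seq_dict (j : Int)
        = decide (2 * (colCnt seq_dict j : Int) > (seq_dict.length : Int)) := by
    intro j hj
    rw [List.mem_range] at hj
    have := is_match_state_eq seq_dict (j : Int) hnd (by positivity)
      (fun kv hkv => by have := hlen kv hkv; omega)
    rw [this, Int.toNat_natCast]
  have hB := calcB_loop seq_dict (List.replicate n 0)
    (by intro kv hkv; have := hlen kv hkv; simp only [List.length_replicate]; omega)
  have hmapeq : (List.range n).map (fun j : Nat => is_match_state seq_dict (j : Int))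
      = ((List.range ((List.replicate n (0:Int)).length)).map
          (fun j => (List.replicate n (0:Int)).getD j 0 + (colCnt seq_dict j : Int))).map
          (fun c => decide (2 * c > (seq_dict.length : Int))) := by
    rw [List.map_map, List.length_replicate]
    apply List.map_congr_left
    intro j hj
    rw [hq j hj]
    simp
  show ((PySem.List.pyRange 0 len_align 1).foldl
      (fun st i => if is_match_state seq_dict i then (st.1.set i.toNat true, st.2 + 1) else st)
      ((PySem.List.pyRange 0 len_align 1).map (fun _ => false), (0 : Int)))
    = ((seq_dict.foldl (fun counts kv =>
          (counts.zip kv.2.toList).map (fun p => p.1 + (if p.2 ≠ '-' then 1 else 0)))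
          (List.replicate ((max len_align 0).toNat) 0)).map
          (fun c => decide (2 * c > (seq_dict.length : Int))),
       (((seq_dict.foldl (fun counts kv =>
          (counts.zip kv.2.toList).map (fun p => p.1 + (if p.2 ≠ '-' then 1 else 0)))
          (List.replicate ((max len_align 0).toNat) 0)).map
          (fun c => decide (2 * c > (seq_dict.length : Int)))).count true : Int))
  rw [hrange, hinit, calcA_loop (is_match_state seq_dict) n n 0 (le_refl n), hmaxn, hB,
      ← hmapeq]
  refine Prod.ext ?_ ?_
  · simp
  · simp only [zero_add]
    rw [List.count_eq_countP, List.countP_map]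
    congr 1
    apply List.countP_congr
    intro j hj
    simp
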